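-- pv_equiv track=rewrite | github.com/Harshvardhan-Walia/COMP5012_CI_ASSESSMENT | main.py | evaluate
-- ===== SOURCE A (Python) =====
-- def evaluate(assignment, cost):
--     total_cost = 0
--     max_cost = 0
--
--     for worker, task in enumerate(assignment):
--         c = cost[worker][task]
--         total_cost += c
--         if c > max_cost:
--             max_cost = c
--
--     return (total_cost, max_cost)
-- ===== SOURCE B (Python) =====
-- def evaluate(assignment, cost):
--     # B: divide-and-conquer over index segments [lo, hi): solve each half
--     # independently and merge (sum the totals, take the larger max).
--     # An empty segment contributes the neutral pair (0, 0), so an empty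
--     # assignment yields (0, 0) and the max never drops below 0.
--     def solve(lo, hi):
--         if lo == hi:
--             return (0, 0)
--         if hi - lo == 1:
--             c = cost[lo][assignment[lo]]
--             return (c, c if c > 0 else 0)
--         mid = (lo + hi) // 2
--         t1, m1 = solve(lo, mid)
--         t2, m2 = solve(mid, hi)
--         return (t1 + t2, m1 if m1 > m2 else m2)
--     return solve(0, len(assignment))
-- ===== Notes on version B (the rewrite author's own statement) =====
-- stated objective: alternative
-- what changed: Replaces A's single left-to-right fused accumulation loop with a recursive divide-and-conquer over index segments: each half is solved independently and the results are merged by adding totals and taking the larger max (proved order-independent).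
import Mathlib
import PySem

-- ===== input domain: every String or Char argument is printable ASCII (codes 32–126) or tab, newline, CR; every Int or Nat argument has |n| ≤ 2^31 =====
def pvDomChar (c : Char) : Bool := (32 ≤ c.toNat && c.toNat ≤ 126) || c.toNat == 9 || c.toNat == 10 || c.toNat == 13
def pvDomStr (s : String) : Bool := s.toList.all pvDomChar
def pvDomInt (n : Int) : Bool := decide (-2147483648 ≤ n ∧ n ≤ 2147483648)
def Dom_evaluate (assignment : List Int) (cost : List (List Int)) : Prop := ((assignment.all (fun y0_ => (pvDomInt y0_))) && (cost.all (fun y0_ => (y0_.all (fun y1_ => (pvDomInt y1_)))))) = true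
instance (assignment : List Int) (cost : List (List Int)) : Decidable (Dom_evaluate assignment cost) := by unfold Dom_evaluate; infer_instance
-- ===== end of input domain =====

-- B replaces A's single fused accumulation loop with a recursive divide-and-conquer
-- over index segments, merging half-results (add totals, larger max); same cost.

-- ===== PORT A =====
def evaluate (assignment : List Int) (cost : List (List Int)) : Int × Int :=
  let s := (PySem.List.enumerate assignment 0).foldl
    (fun (s : Int × Int) wt =>
      let c := PySem.List.pyGetD (PySem.List.pyGetD cost wt.1 []) wt.2 0
      (s.1 + c, if c > s.2 then c else s.2))
    (0, 0)
  (s.1, s.2)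

-- ===== PORT B =====
-- recursive helper solve(lo, hi) from Source B; the Nat `fuel` only makes the
-- recursion total in Lean (evaluate_alt supplies enough that it is never exhausted)
def evalSolve (assignment : List Int) (cost : List (List Int)) (fuel : Nat) (lo hi : Int) : Int × Int :=
  if lo = hi then (0, 0)
  else if hi - lo = 1 then
    let c := PySem.List.pyGetD (PySem.List.pyGetD cost lo [])
               (PySem.List.pyGetD assignment lo 0) 0
    (c, if c > 0 then c else 0)
  else
    match fuel with
    | 0 => (0, 0)   -- fuel guard, never reached from evaluate_alt
    | f + 1 =>
      let mid := PySem.Int.floordiv (lo + hi) 2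
      let r1 := evalSolve assignment cost f lo mid
      let r2 := evalSolve assignment cost f mid hi
      (r1.1 + r2.1, if r1.2 > r2.2 then r1.2 else r2.2)

def evaluate_alt (assignment : List Int) (cost : List (List Int)) : Int × Int :=
  evalSolve assignment cost assignment.length 0 assignment.length

-- ===== PRECONDITION & SPEC =====
-- Pre_ excludes exactly the inputs where A raises IndexError: a worker index beyond
-- cost, or a task index outside Python range of its row.
def Pre_evaluate (assignment : List Int) (cost : List (List Int)) : Prop :=
  assignment.length ≤ cost.length ∧
  ∀ p ∈ assignment.zip cost, PySem.Raise.InRange p.2.length p.1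
instance (assignment : List Int) (cost : List (List Int)) : Decidable (Pre_evaluate assignment cost) := by unfold Pre_evaluate; infer_instance

def pvWitness_evaluate : List Int × List (List Int) := ([0, -1], [[3, 7], [1, 2]])

def Spec_evaluate (assignment : List Int) (cost : List (List Int)) (out : Int × Int) : Prop := out = evaluate_alt assignment cost
instance (assignment : List Int) (cost : List (List Int)) (out : Int × Int) : Decidable (Spec_evaluate assignment cost out) := by unfold Spec_evaluate; infer_instance

-- ===== CLAIM =====
def Claim_equal_evaluate : Prop := ∀ (assignment : List Int) (cost : List (List Int)), Dom_evaluate assignment cost → Pre_evaluate assignment cost → Spec_evaluate assignment cost (evaluate assignment cost)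

-- ===== LEMMAS AND PROOFS =====

-- the cost chosen for worker i, read through Python indexing (shared spec vocabulary)
def chosenF (assignment : List Int) (cost : List (List Int)) (i : Int) : Int :=
  PySem.List.pyGetD (PySem.List.pyGetD cost i [])
    (PySem.List.pyGetD assignment i 0) 0

-- the list of chosen costs on the segment [lo, lo+n)
def seg (assignment : List Int) (cost : List (List Int)) (lo : Int) (n : Nat) : List Int :=
  (List.range n).map (fun (k : Nat) => chosenF assignment cost (lo + (k : Int)))

theorem seg_split (assignment : List Int) (cost : List (List Int)) (lo : Int) (a b : Nat) :
    seg assignment cost lo (a + b) = seg assignment cost lo a ++ seg assignment cost (lo + a) b := by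
  unfold seg
  rw [List.range_add, List.map_append, List.map_map]
  congr 1
  apply List.map_congr_left
  intro k _
  simp only [Function.comp]
  push_cast
  ring_nf

theorem rmax_eq_max (a c : Int) : (if c > a then c else a) = max a c := by
  by_cases h : a < c <;> simp [h, max_def] <;> omega

theorem foldl_max_start (l : List Int) (m : Int) (hm : 0 ≤ m) :
    l.foldl (fun a c => max a c) m = max m (l.foldl (fun a c => max a c) 0) := by
  induction l generalizing m with
  | nil => simp only [List.foldl_nil]; omega
  | cons c cs ih =>
    simp only [List.foldl_cons]
    rw [ih (max m c) (by omega), ih (max 0 c) (by omega)]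
    omega

theorem foldl_max_nonneg (l : List Int) : 0 ≤ l.foldl (fun a c => max a c) 0 := by
  induction l with
  | nil => simp
  | cons c cs ih =>
    simp only [List.foldl_cons]
    rw [foldl_max_start cs (max 0 c) (by omega)]
    omega

theorem foldl_max_append (l1 l2 : List Int) :
    (l1 ++ l2).foldl (fun a c => max a c) 0
      = max (l1.foldl (fun a c => max a c) 0) (l2.foldl (fun a c => max a c) 0) := by
  rw [List.foldl_append, foldl_max_start l2 _ (foldl_max_nonneg l1)]

-- characterisation of B's recursion: with enough fuel,
-- solve lo (lo+n) = (sum, running max from 0) of the segment of chosen costs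
theorem evalSolve_eq (assignment : List Int) (cost : List (List Int)) :
    ∀ (n : Nat) (fuel : Nat) (lo : Int), n ≤ fuel + 1 →
      evalSolve assignment cost fuel lo (lo + n)
        = ((seg assignment cost lo n).sum,
           (seg assignment cost lo n).foldl (fun a c => max a c) 0) := by
  intro n
  induction n using Nat.strong_induction_on with
  | _ n ih =>
    intro fuel lo hfuel
    match n with
    | 0 => rw [evalSolve.eq_def]; simp [seg]
    | 1 =>
      rw [evalSolve.eq_def]
      have h0 : ¬ (lo = lo + ((1:Nat) : Int)) := by push_cast; omega
      have h1 : lo + ((1:Nat) : Int) - lo = 1 := by push_cast; ring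
      rw [if_neg h0, if_pos h1]
      simp only [seg, List.range_one, List.map_cons, List.map_nil, List.sum_cons,
        List.sum_nil, List.foldl_cons, List.foldl_nil, chosenF, rmax_eq_max]
      simp
    | (m + 2) =>
      match fuel, hfuel with
      | f + 1, _ =>
        rw [evalSolve.eq_def]
        have h0 : ¬ (lo = lo + ((m+2 : Nat) : Int)) := by push_cast; omega
        have h1 : ¬ (lo + ((m+2 : Nat) : Int) - lo = 1) := by push_cast; omega
        rw [if_neg h0, if_neg h1]
        have hmid : PySem.Int.floordiv (lo + (lo + ((m+2:Nat) : Int))) 2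
            = lo + (((m+2)/2 : Nat) : Int) := by
          rw [PySem.Int.floordiv_eq_ediv_of_pos (by omega : (0:Int) < 2)]
          push_cast
          omega
        set a : Nat := (m+2)/2 with ha
        have hb : a + (m + 2 - a) = m + 2 := by omega
        simp only [hmid]
        rw [ih a (by omega) f lo (by omega)]
        have h2 : lo + ((m+2:Nat) : Int) = (lo + (a:Int)) + ((m + 2 - a : Nat) : Int) := by
          push_cast; omega
        rw [h2, ih (m + 2 - a) (by omega) f (lo + (a:Int)) (by omega)]
        have hseg : seg assignment cost lo (m+2)
            = seg assignment cost lo a ++ seg assignment cost (lo + a) (m + 2 - a) := by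
          have h3 := seg_split assignment cost lo a (m + 2 - a)
          rw [hb] at h3
          exact h3
        rw [hseg, List.sum_append, foldl_max_append, rmax_eq_max]
        simp [max_comm]

-- A's fused fold over any list of (worker, task) pairs splits into sum and running max
theorem fused_foldl (f : Int × Int → Int) (l : List (Int × Int)) (t m : Int) :
    l.foldl (fun (s : Int × Int) wt => (s.1 + f wt, if f wt > s.2 then f wt else s.2)) (t, m)
      = (t + (l.map f).sum,
         (l.map f).foldl (fun a c => max a c) m) := by
  induction l generalizing t m with
  | nil => simp
  | cons x xs ih =>
    simp only [List.foldl_cons, List.map_cons, List.sum_cons]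
    rw [ih, rmax_eq_max]
    simp [add_assoc]

-- the enumerate traversal of A produces exactly the chosen-cost segment from 0
theorem enumerate_map_eq_seg (assignment : List Int) (cost : List (List Int)) :
    (PySem.List.enumerate assignment 0).map
        (fun wt => PySem.List.pyGetD (PySem.List.pyGetD cost wt.1 []) wt.2 0)
      = seg assignment cost 0 assignment.length := by
  rw [PySem.List.enumerate_eq_map_pyRange (d := 0), List.map_map, PySem.List.len_eq,
    PySem.List.pyRange_zero_natCast, List.map_map]
  apply List.map_congr_left
  intro k _
  simp [Function.comp, chosenF]

-- ===== VERDICT =====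
theorem evaluate_spec : Claim_equal_evaluate := by
  intro assignment cost _ _
  unfold Spec_evaluate evaluate evaluate_alt
  rw [show ((assignment.length : Int)) = (0:Int) + (assignment.length : Int) by omega,
    evalSolve_eq assignment cost assignment.length assignment.length 0 (by omega)]
  rw [fused_foldl (fun wt => PySem.List.pyGetD (PySem.List.pyGetD cost wt.1 []) wt.2 0)
    (PySem.List.enumerate assignment 0) 0 0, enumerate_map_eq_seg]
  simp
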